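-- pv_equiv track=rewrite | github.com/manwar/perlweeklychallenge-club | challenge-074/roger-bell-west/python/ch-2.py | fnr
-- ===== SOURCE A (Python) =====
-- def fnr(i):
--     s=dict()
--     ls=list()
--     o=list()
--     for c in list(i):
--         ls.append(c)
--         s.setdefault(c,0)
--         s[c] += 1
--         ls=[x for x in ls if s[x]<2]
--         if len(ls)>0:
--             o.append(ls[len(ls)-1])
--         else:
--             o.append('#')
--     return ''.join(o)
-- ===== SOURCE B (Python) =====
-- def fnr(i):
--     # O(n): counts per char plus an insertion-ordered dict of the chars seen
--     # exactly once so far; the answer for each prefix is its last key.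
--     count = {}
--     once = {}
--     out = []
--     for c in i:
--         n = count.get(c, 0) + 1
--         count[c] = n
--         if n == 1:
--             once[c] = True
--         elif n == 2:
--             del once[c]
--         out.append(next(reversed(once)) if once else '#')
--     return ''.join(out)
-- ===== Notes on version B (the rewrite author's own statement) =====
-- stated objective: faster
-- what changed: Instead of re-filtering the whole list of seen characters at every step (quadratic), B keeps a count per character and an insertion-ordered dict of the characters seen exactly once, inserting on first occurrence and deleting on the second, and reads the last key per step.
import Mathlib
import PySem

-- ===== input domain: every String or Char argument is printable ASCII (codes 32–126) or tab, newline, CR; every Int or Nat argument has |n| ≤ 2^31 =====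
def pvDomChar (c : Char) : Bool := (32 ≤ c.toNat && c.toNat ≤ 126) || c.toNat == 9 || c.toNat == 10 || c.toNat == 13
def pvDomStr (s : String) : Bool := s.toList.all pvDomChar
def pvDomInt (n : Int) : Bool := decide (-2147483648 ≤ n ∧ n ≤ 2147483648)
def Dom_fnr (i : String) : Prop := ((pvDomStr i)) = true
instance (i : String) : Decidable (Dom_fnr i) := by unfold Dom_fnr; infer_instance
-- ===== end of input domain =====

-- B replaces A's per-step re-filtering of the list of seen characters by a count dict
-- plus an insertion-ordered dict of the characters seen exactly once (asymptotically faster).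

-- ===== PORT A =====
-- loop body of A; s[x] in the filter is ported as getD (exact: every x in ls is a key of s)
def fnrStepA (st : PySem.Dict Char Int × List Char × List Char) (c : Char) :
    PySem.Dict Char Int × List Char × List Char :=
  let ls0 := st.2.1 ++ [c]                                -- ls.append(c)
  let s1 := st.1.setdefault c 0                           -- s.setdefault(c,0)
  let s2 := s1.insert c (s1.getD c 0 + 1)                 -- s[c] += 1
  let ls1 := ls0.filter (fun x => s2.getD x 0 < 2)        -- ls=[x for x in ls if s[x]<2]
  let o := if 0 < ls1.length then st.2.2 ++ [ls1.getLast!] else st.2.2 ++ ['#']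
  (s2, ls1, o)

def fnr (i : String) : String :=
  String.mk (i.toList.foldl fnrStepA (PySem.Dict.empty, [], [])).2.2

-- ===== PORT B =====
def fnrStepB (st : PySem.Dict Char Int × PySem.Dict Char Bool × List Char) (c : Char) :
    PySem.Dict Char Int × PySem.Dict Char Bool × List Char :=
  let n := st.1.getD c 0 + 1                              -- n = count.get(c,0)+1
  let count := st.1.insert c n                            -- count[c] = n
  let once := if n = 1 then st.2.1.insert c true          -- once[c] = True
              else if n = 2 then st.2.1.erase c           -- del once[c]
              else st.2.1
  (count, once, st.2.2 ++ [once.keys.getLast?.getD '#'])  -- next(reversed(once)) if once else '#'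

def fnr_alt (i : String) : String :=
  String.mk (i.toList.foldl fnrStepB (PySem.Dict.empty, PySem.Dict.empty, [])).2.2

-- ===== PRECONDITION & SPEC =====
def Spec_fnr (i : String) (out : String) : Prop := out = fnr_alt i
instance (i : String) (out : String) : Decidable (Spec_fnr i out) := by unfold Spec_fnr; infer_instance

-- ===== CLAIM (what is proved, stated in full; the proofs are below) =====
def Claim_equal_fnr : Prop := ∀ (i : String), Dom_fnr i → Spec_fnr i (fnr i)

-- ===== LEMMAS AND PROOFS =====

-- Invariant relating A's state and B's state after processing the prefix p.
def InvAB (p : List Char) (a : PySem.Dict Char Int × List Char × List Char)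
    (b : PySem.Dict Char Int × PySem.Dict Char Bool × List Char) : Prop :=
  (∀ x, a.1.getD x 0 = (p.count x : Int)) ∧
  (∀ x, b.1.getD x 0 = (p.count x : Int)) ∧
  a.2.1 = b.2.1.keys ∧
  a.2.1.Nodup ∧
  (∀ x, x ∈ a.2.1 ↔ p.count x = 1) ∧
  a.2.2 = b.2.2

theorem keys_erase_eq_filter (d : PySem.Dict Char Bool) (k : Char) :
    (d.erase k).keys = d.keys.filter (fun x => !(x == k)) := by
  simp [PySem.Dict.erase, PySem.Dict.keys, List.filter_map]
  rfl

theorem getLast!_eq_getLast?_getD (l : List Char) (h : l ≠ []) (d : Char) :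
    l.getLast! = l.getLast?.getD d := by
  cases l with
  | nil => exact absurd rfl h
  | cons a as =>
    rw [List.getLast?_eq_getLast (by simp)]
    simp [List.getLast!]

theorem inv_step (p : List Char) (c : Char) (a : PySem.Dict Char Int × List Char × List Char)
    (b : PySem.Dict Char Int × PySem.Dict Char Bool × List Char)
    (h : InvAB p a b) : InvAB (p ++ [c]) (fnrStepA a c) (fnrStepB b c) := by
  obtain ⟨hs, hcnt, hkeys, hnd, hmem, hout⟩ := h
  obtain ⟨s, ls, o⟩ := a
  obtain ⟨cnt, once, out⟩ := b
  simp only at hs hcnt hkeys hnd hmem hout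
  -- counts after the step
  have hs2 : ∀ x, ((s.setdefault c 0).insert c ((s.setdefault c 0).getD c 0 + 1)).getD x 0
      = ((p ++ [c]).count x : Int) := by
    intro x
    rw [PySem.Dict.getD_insert]
    by_cases hx : x = c
    · subst hx
      rw [PySem.Dict.getD_setdefault_self, hs]
      simp [List.count_append]
    · rw [if_neg hx, PySem.Dict.getD_eq_get?_getD, PySem.Dict.get?_setdefault_of_ne s 0 hx,
        ← PySem.Dict.getD_eq_get?_getD, hs]
      simp [List.count_append, List.count_singleton, hx, Ne.symm hx]
  have hcnt2 : ∀ x, (cnt.insert c (cnt.getD c 0 + 1)).getD x 0 = ((p ++ [c]).count x : Int) := by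
    intro x
    rw [PySem.Dict.getD_insert]
    by_cases hx : x = c
    · subst hx; rw [hcnt]; simp [List.count_append]
    · rw [if_neg hx, hcnt]; simp [List.count_append, List.count_singleton, hx, Ne.symm hx]
  have hval : ∀ x ∈ ls, (p.count x) = 1 := fun x hx => (hmem x).mp hx
  have hcount_new : ∀ x, (p ++ [c]).count x = p.count x + (if x = c then 1 else 0) := by
    intro x
    by_cases hx : x = c
    · subst hx; simp [List.count_append]
    · simp [List.count_append, List.count_singleton, hx, Ne.symm hx]
  have hqtrue : ∀ x ∈ ls, x ≠ c →
      decide (((s.setdefault c 0).insert c ((s.setdefault c 0).getD c 0 + 1)).getD x 0 < 2) = true := by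
    intro x hx hxc
    have h1 := hval x hx
    simp only [hs2, hcount_new, if_neg hxc, decide_eq_true_eq]
    push_cast
    omega
  unfold fnrStepA fnrStepB
  dsimp only
  by_cases hv : p.count c = 0
  -- case count = 0 : first occurrence, append
  · have hcnotin : c ∉ ls := fun hin => by have h1 := hval c hin; omega
    have hfilter : (ls ++ [c]).filter
        (fun x => decide (((s.setdefault c 0).insert c ((s.setdefault c 0).getD c 0 + 1)).getD x 0 < 2))
        = ls ++ [c] := by
      apply List.filter_eq_self.mpr
      intro x hx
      rcases List.mem_append.mp hx with hx | hx
      · exact hqtrue x hx (fun hxc => hcnotin (hxc ▸ hx))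
      · simp only [List.mem_singleton] at hx
        rw [hx, hs2 c, hcount_new c, if_pos rfl, hv]
        norm_num
    have hcond : (cnt.getD c 0 + 1 = 1) := by rw [hcnt, hv]; norm_num
    have honce_notin : once.contains c = false := by
      rw [← Bool.not_eq_true, PySem.Dict.contains_iff_mem_keys]
      rw [← hkeys]; intro hin; have := (hmem c).mp hin; omega
    refine ⟨hs2, hcnt2, ?_, ?_, ?_, ?_⟩
    · rw [hfilter, if_pos hcond, PySem.Dict.keys_insert_of_not_contains _ _ honce_notin, ← hkeys]
    · rw [hfilter]
      exact List.Nodup.append hnd (List.nodup_singleton c) (by simpa using hcnotin)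
    · intro x
      rw [hfilter]
      by_cases hx : x = c
      · subst hx; simp [hcount_new, hv]
      · simp [hx, hmem x, hcount_new]
    · rw [hfilter, if_pos hcond, PySem.Dict.keys_insert_of_not_contains _ _ honce_notin, ← hkeys,
        hout, if_pos (by simp), getLast!_eq_getLast?_getD (ls ++ [c]) (by simp) '#']
  · by_cases hv1 : p.count c = 1
    -- case count = 1 : second occurrence, remove
    · have hcin : c ∈ ls := (hmem c).mpr hv1
      have hqc : decide (((s.setdefault c 0).insert c ((s.setdefault c 0).getD c 0 + 1)).getD c 0 < 2) = false := by
        rw [hs2 c, hcount_new c, if_pos rfl, hv1]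
        norm_num
      have hfilter : (ls ++ [c]).filter
          (fun x => decide (((s.setdefault c 0).insert c ((s.setdefault c 0).getD c 0 + 1)).getD x 0 < 2))
          = ls.filter (fun x => !(x == c)) := by
        rw [List.filter_append, List.filter_singleton, hqc, Bool.cond_false, List.append_nil]
        apply List.filter_congr
        intro x hx
        by_cases hxc : x = c
        · subst hxc; rw [hqc]; simp
        · rw [hqtrue x hx hxc]; simp [hxc]
      have hcond1 : ¬ (cnt.getD c 0 + 1 = 1) := by rw [hcnt, hv1]; norm_num
      have hcond2 : (cnt.getD c 0 + 1 = 2) := by rw [hcnt, hv1]; norm_num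
      refine ⟨hs2, hcnt2, ?_, ?_, ?_, ?_⟩
      · rw [hfilter, if_neg hcond1, if_pos hcond2, keys_erase_eq_filter, ← hkeys]
      · rw [hfilter]
        exact hnd.filter _
      · intro x
        rw [hfilter]
        by_cases hx : x = c
        · subst hx; simp [hcount_new, hv1]
        · simp [hx, hmem x, hcount_new]
      · rw [hfilter, if_neg hcond1, if_pos hcond2, keys_erase_eq_filter, ← hkeys, hout]
        by_cases hne : ls.filter (fun x => !(x == c)) = []
        · rw [if_neg (by simp [hne]), hne]; rfl
        · rw [if_pos (by simpa using List.length_pos_iff.mpr hne),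
            getLast!_eq_getLast?_getD _ hne '#']
    -- case count ≥ 2 : nothing changes
    · have hv2 : 2 ≤ p.count c := by omega
      have hcnotin : c ∉ ls := fun hin => by have := hval c hin; omega
      have hqc : decide (((s.setdefault c 0).insert c ((s.setdefault c 0).getD c 0 + 1)).getD c 0 < 2) = false := by
        rw [hs2 c, hcount_new c, if_pos rfl]
        simp only [decide_eq_false_iff_not]
        push_cast
        omega
      have hfilter : (ls ++ [c]).filter
          (fun x => decide (((s.setdefault c 0).insert c ((s.setdefault c 0).getD c 0 + 1)).getD x 0 < 2))
          = ls := by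
        rw [List.filter_append, List.filter_singleton, hqc, Bool.cond_false, List.append_nil]
        apply List.filter_eq_self.mpr
        intro x hx
        exact hqtrue x hx (fun hxc => hcnotin (hxc ▸ hx))
      have hcond1 : ¬ (cnt.getD c 0 + 1 = 1) := by rw [hcnt]; push_cast; omega
      have hcond2 : ¬ (cnt.getD c 0 + 1 = 2) := by rw [hcnt]; push_cast; omega
      refine ⟨hs2, hcnt2, ?_, ?_, ?_, ?_⟩
      · rw [hfilter, if_neg hcond1, if_neg hcond2, ← hkeys]
      · rw [hfilter]
        exact hnd
      · intro x
        rw [hfilter]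
        by_cases hx : x = c
        · subst hx; simp [hcount_new, hcnotin]; omega
        · simp [hx, hmem x, hcount_new]
      · rw [hfilter, if_neg hcond1, if_neg hcond2, ← hkeys, hout]
        by_cases hne : ls = []
        · rw [if_neg (by simp [hne]), hne]; rfl
        · rw [if_pos (by simpa using List.length_pos_iff.mpr hne),
            getLast!_eq_getLast?_getD _ hne '#']

theorem inv_fold (p : List Char) :
    InvAB p (p.foldl fnrStepA (PySem.Dict.empty, [], []))
      (p.foldl fnrStepB (PySem.Dict.empty, PySem.Dict.empty, [])) := by
  induction p using List.reverseRecOn with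
  | nil =>
    refine ⟨?_, ?_, rfl, List.nodup_nil, ?_, rfl⟩ <;> intro x <;> simp [PySem.Dict.getD_empty]
  | append_singleton p c ih =>
    rw [List.foldl_append, List.foldl_append]
    exact inv_step p c _ _ ih

-- ===== VERDICT (by name: the statement is the Claim_ definition above) =====
theorem fnr_spec : Claim_equal_fnr := by
  intro i _
  unfold Spec_fnr fnr fnr_alt
  rw [(inv_fold i.toList).2.2.2.2.2]
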